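-- pv_equiv track=rewrite | github.com/adrienecastro/RAG-Chatbot | ingest.py | get_txt_headers
-- ===== SOURCE A (Python) =====
-- def get_txt_headers(text: str) -> tuple:
--     HEADER_KEYS = {
--         "TOPIC", "PRODUCT", "CATEGORY",
--         "KEYWORDS", "SOURCE_PDF", "SOURCE_URL"
--     }
--     lines = text.splitlines()
--     headers = {}
--     content_start = 0
--
--     for i, line in enumerate(lines):
--         stripped = line.strip()
--         if ":" in stripped:
--             key = stripped.split(":", 1)[0].strip().upper()
--             if key in HEADER_KEYS:
--                 value = stripped.split(":", 1)[1].strip()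
--                 headers[key] = value
--                 content_start = i + 1
--                 continue
--         break
--
--     content = "\n".join(lines[content_start:]).strip()
--     return content, headers
-- ===== SOURCE B (Python) =====
-- def get_txt_headers(text: str) -> tuple:
--     HEADER_KEYS = {
--         "TOPIC", "PRODUCT", "CATEGORY",
--         "KEYWORDS", "SOURCE_PDF", "SOURCE_URL"
--     }
--
--     def parse(lines):
--         # recursive descent: consume one header line, merge it in front of the
--         # result of parsing the rest (dict built back-to-front on return)
--         if lines:
--             stripped = lines[0].strip()
--             if ":" in stripped:
--                 key, value = stripped.split(":", 1)
--                 key = key.strip().upper()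
--                 if key in HEADER_KEYS:
--                     content, rest = parse(lines[1:])
--                     return content, {key: value.strip(), **rest}
--         return "\n".join(lines).strip(), {}
--
--     return parse(text.splitlines())
-- ===== Notes on version B (the rewrite author's own statement) =====
-- stated objective: alternative
-- what changed: A's single forward loop with mutable headers dict and content_start counter is replaced by a recursive descent over the lines that builds the result on the way back: each header line is merged in front of the recursively parsed tail via {key: value, **rest}, and the content is the join at the recursion's base case.
import Mathlib
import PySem

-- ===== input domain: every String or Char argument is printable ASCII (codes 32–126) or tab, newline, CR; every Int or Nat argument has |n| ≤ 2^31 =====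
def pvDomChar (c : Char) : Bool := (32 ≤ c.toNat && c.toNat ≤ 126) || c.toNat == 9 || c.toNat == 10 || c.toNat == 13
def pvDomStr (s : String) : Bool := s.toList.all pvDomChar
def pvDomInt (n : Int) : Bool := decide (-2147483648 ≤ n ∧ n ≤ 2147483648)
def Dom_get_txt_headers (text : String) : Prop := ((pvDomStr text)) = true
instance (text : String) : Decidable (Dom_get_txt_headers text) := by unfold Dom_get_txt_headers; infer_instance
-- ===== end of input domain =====

-- B replaces A's single forward loop (mutable dict + content_start counter) by a recursive
-- descent that merges each header in front of the recursively parsed tail ({k: v, **rest});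
-- objective: alternative decomposition, same cost.


-- ===== PORT A =====
def headerKeysA : List String :=
  ["TOPIC", "PRODUCT", "CATEGORY", "KEYWORDS", "SOURCE_PDF", "SOURCE_URL"]

-- s.split(":", 1); the separator is the nonempty literal ":" so splitMax? is always `some` (getD never fires)
def splitColon1A (s : String) : List String := (PySem.Str.splitMax? s ":" 1).getD []

-- the for-loop with break: recursion over enumerate(lines), state (headers, content_start)
def aLoop (pairs : List (Int × String)) (headers : PySem.Dict String String) (cs : Int) :
    PySem.Dict String String × Int :=
  match pairs with
  | [] => (headers, cs)
  | (i, line) :: rest =>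
    let stripped := PySem.Str.strip line
    if PySem.Str.isIn ":" stripped then
      let key := PySem.Str.upper (PySem.Str.strip ((splitColon1A stripped).getD 0 ""))
      if headerKeysA.contains key then
        let value := PySem.Str.strip ((splitColon1A stripped).getD 1 "")
        aLoop rest (headers.insert key value) (i + 1)
      else (headers, cs)
    else (headers, cs)

def get_txt_headers (text : String) : String × (List (String × String)) :=
  let lines := PySem.Str.splitlines text
  let r := aLoop (PySem.List.enumerate lines 0) PySem.Dict.empty 0
  (PySem.Str.strip (PySem.Str.join "\n" (PySem.List.slice lines (some r.2) none)), r.1.items)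

-- ===== PORT B =====
def headerKeysB : List String :=
  ["TOPIC", "PRODUCT", "CATEGORY", "KEYWORDS", "SOURCE_PDF", "SOURCE_URL"]

-- s.split(":", 1); the separator is the nonempty literal ":" so splitMax? is always `some` (getD never fires)
def splitColon1B (s : String) : List String := (PySem.Str.splitMax? s ":" 1).getD []

-- the recursive parse: consume one header line, merge it in front of the parsed tail;
-- {key: value, **rest} = the singleton dict updated with rest's items
def bParse (lines : List String) : String × PySem.Dict String String :=
  match lines with
  | [] => (PySem.Str.strip (PySem.Str.join "\n" []), PySem.Dict.empty)
  | l :: rest =>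
    let stripped := PySem.Str.strip l
    if PySem.Str.isIn ":" stripped then
      let parts := splitColon1B stripped
      let key := PySem.Str.upper (PySem.Str.strip (parts.getD 0 ""))
      if headerKeysB.contains key then
        let r := bParse rest
        (r.1, ((PySem.Dict.empty.insert key (PySem.Str.strip (parts.getD 1 ""))).update r.2.items))
      else (PySem.Str.strip (PySem.Str.join "\n" (l :: rest)), PySem.Dict.empty)
    else (PySem.Str.strip (PySem.Str.join "\n" (l :: rest)), PySem.Dict.empty)

def get_txt_headers_alt (text : String) : String × (List (String × String)) :=
  let r := bParse (PySem.Str.splitlines text)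
  (r.1, r.2.items)

-- ===== PRECONDITION & SPEC =====
def Spec_get_txt_headers (text : String) (out : String × (List (String × String))) : Prop := out = get_txt_headers_alt text
instance (text : String) (out : String × (List (String × String))) : Decidable (Spec_get_txt_headers text out) := by unfold Spec_get_txt_headers; infer_instance

-- ===== CLAIM (what is proved, stated in full; the proofs are below) =====
def Claim_equal_get_txt_headers : Prop := ∀ (text : String), Dom_get_txt_headers text → Spec_get_txt_headers text (get_txt_headers text)

-- ===== LEMMAS AND PROOFS =====

-- the shared header predicate, used only by the proofs
def isHdr (line : String) : Bool :=
  PySem.Str.isIn ":" (PySem.Str.strip line) &&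
    headerKeysA.contains
      (PySem.Str.upper (PySem.Str.strip ((splitColon1A (PySem.Str.strip line)).getD 0 "")))

-- ---- generic Dict lemmas: merging a built-up dict's items equals re-running the inserts ----

lemma insert_comm_of_contains {κ ν : Type} [BEq κ] [LawfulBEq κ]
    (d : PySem.Dict κ ν) (k k' : κ) (v v' : ν) (hne : k' ≠ k)
    (hc : d.contains k = true) :
    (d.insert k' v').insert k v = (d.insert k v).insert k' v' := by
  have hbne : (k' == k) = false := by simp [hne]
  have hbne' : (k == k') = false := by simp [Ne.symm hne]
  have hc1 : (d.insert k' v').contains k = true := by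
    rw [PySem.Dict.contains_insert]; simp [hc]
  apply PySem.Dict.ext
  by_cases hck' : d.contains k' = true
  · have hck'2 : (d.insert k v).contains k' = true := by
      rw [PySem.Dict.contains_insert]; simp [hck']
    simp only [PySem.Dict.items_insert, hc1, hck', hck'2, hc, if_true, List.map_map]
    apply List.map_congr_left
    intro q _
    by_cases h1 : (q.1 == k) = true
    · have h2 : (q.1 == k') = false := by
        rw [eq_of_beq h1]; exact hbne'
      simp [Function.comp, h1, h2, hbne, hbne']
    · by_cases h2 : (q.1 == k') = true
      · simp [Function.comp, h1, h2, hbne, hbne']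
      · simp [Function.comp, h1, h2]
  · have hck'' : d.contains k' = false := by simpa using hck'
    have hck'2 : (d.insert k v).contains k' = false := by
      rw [PySem.Dict.contains_insert]; simp [hck'', hbne]
    simp only [PySem.Dict.items_insert, hc1, hck'', hck'2, hc, if_true, Bool.false_eq_true,
      if_false, List.map_append, List.map_cons, List.map_nil, hbne]

lemma foldl_insert_push {κ ν : Type} [BEq κ] [LawfulBEq κ]
    (xs : List (κ × ν)) (d : PySem.Dict κ ν) (k : κ) (v : ν)
    (hk : k ∉ xs.map Prod.fst) (hc : d.contains k = true) :
    (xs.foldl (fun a p => a.insert p.1 p.2) d).insert k v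
      = xs.foldl (fun a p => a.insert p.1 p.2) (d.insert k v) := by
  induction xs generalizing d with
  | nil => rfl
  | cons p ps ih =>
    simp only [List.map_cons, List.mem_cons, not_or] at hk
    have hc' : (d.insert p.1 p.2).contains k = true := by
      rw [PySem.Dict.contains_insert]; simp [hc]
    simp only [List.foldl_cons]
    rw [ih (d.insert p.1 p.2) hk.2 hc',
        insert_comm_of_contains d k p.1 v p.2 (Ne.symm hk.1) hc]

lemma foldl_insert_map_subst {κ ν : Type} [BEq κ] [LawfulBEq κ]
    (xs : List (κ × ν)) (d : PySem.Dict κ ν) (k : κ) (v : ν)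
    (hnd : (xs.map Prod.fst).Nodup) (hk : k ∈ xs.map Prod.fst) :
    (xs.map (fun q => if q.1 == k then (k, v) else q)).foldl (fun a p => a.insert p.1 p.2) d
      = (xs.foldl (fun a p => a.insert p.1 p.2) d).insert k v := by
  induction xs generalizing d with
  | nil => simp at hk
  | cons q ps ih =>
    simp only [List.map_cons, List.nodup_cons] at hnd
    by_cases h1 : (q.1 == k) = true
    · have hqk : q.1 = k := eq_of_beq h1
      have hknotin : k ∉ ps.map Prod.fst := hqk ▸ hnd.1
      have hmapid : ps.map (fun q' => if q'.1 == k then (k, v) else q') = ps := by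
        have : ∀ q' ∈ ps, (if q'.1 == k then (k, v) else q') = q' := by
          intro q' hq'
          have : (q'.1 == k) = false := by
            simp only [beq_eq_false_iff_ne, ne_eq]
            intro he; exact hknotin (he ▸ List.mem_map_of_mem hq')
          simp [this]
        rw [List.map_congr_left this, List.map_id']
      simp only [List.map_cons, h1, if_true, List.foldl_cons]
      rw [hmapid, hqk,
          foldl_insert_push ps (d.insert k q.2) k v hknotin
            (by rw [PySem.Dict.contains_insert]; simp),
          PySem.Dict.insert_insert_self]
    · have hk' : k ∈ ps.map Prod.fst := by
        rw [List.map_cons] at hk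
        rcases List.mem_cons.mp hk with h | h
        · exact absurd (by simp [h] : (q.1 == k) = true) h1
        · exact h
      simp only [List.map_cons, h1, Bool.false_eq_true, if_false, List.foldl_cons]
      exact ih (d.insert q.1 q.2) hnd.2 hk'

lemma update_foldl_items {κ ν : Type} [BEq κ] [LawfulBEq κ]
    (L : List (κ × ν)) (d : PySem.Dict κ ν) :
    d.update ((L.foldl (fun a p => a.insert p.1 p.2) PySem.Dict.empty).items)
      = L.foldl (fun a p => a.insert p.1 p.2) d := by
  induction L using List.reverseRecOn generalizing d with
  | nil => rfl
  | append_singleton L p ih =>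
    rw [List.foldl_append, List.foldl_append]
    simp only [List.foldl_cons, List.foldl_nil]
    have hnd : ((L.foldl (fun a p => a.insert p.1 p.2) PySem.Dict.empty).keys).Nodup := by
      exact PySem.Dict.nodup_keys_foldl_insert_key L Prod.fst (fun d p => p.2) _
        (by simp [PySem.Dict.nodup_keys_empty])
    have hupd : ∀ (d : PySem.Dict κ ν) (xs : List (κ × ν)),
        d.update xs = xs.foldl (fun a p => a.insert p.1 p.2) d := fun _ _ => rfl
    by_cases hc : (L.foldl (fun a p => a.insert p.1 p.2) PySem.Dict.empty).contains p.1 = true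
    · rw [PySem.Dict.items_insert_of_contains _ _ hc, hupd,
        foldl_insert_map_subst _ d p.1 p.2
          (by simpa [PySem.Dict.keys] using hnd)
          (by have := (PySem.Dict.contains_iff_mem_keys _ _).mp hc
              simpa [PySem.Dict.keys] using this),
        ← hupd, ih]
    · have hc' : (L.foldl (fun a p => a.insert p.1 p.2) PySem.Dict.empty).contains p.1 = false := by
        simpa using hc
      have e : List.foldl (fun a p => a.insert p.1 p.2) d
          (L.foldl (fun a p => a.insert p.1 p.2) PySem.Dict.empty).items
          = L.foldl (fun a p => a.insert p.1 p.2) d := ih d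
      rw [PySem.Dict.items_insert_of_not_contains _ _ hc', hupd, List.foldl_append, e]
      rfl

-- ---- A side: the fused loop computes a foldl of inserts over the header prefix ----
lemma aLoop_spec (lines : List String) (i : Nat) (d : PySem.Dict String String) :
    aLoop (PySem.List.enumerate lines (i : Int)) d (i : Int) =
      ((lines.takeWhile isHdr).foldl
        (fun d line =>
          d.insert (PySem.Str.upper (PySem.Str.strip ((splitColon1A (PySem.Str.strip line)).getD 0 "")))
                   (PySem.Str.strip ((splitColon1A (PySem.Str.strip line)).getD 1 ""))) d,
       ((i + (lines.takeWhile isHdr).length : Nat) : Int)) := by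
  induction lines generalizing i d with
  | nil => simp [PySem.List.enumerate_nil, aLoop]
  | cons l rest ih =>
    rw [PySem.List.enumerate_cons]
    have hiff : isHdr l = (PySem.Str.isIn ":" (PySem.Str.strip l) &&
        headerKeysA.contains
          (PySem.Str.upper (PySem.Str.strip ((splitColon1A (PySem.Str.strip l)).getD 0 "")))) := rfl
    simp only [aLoop]
    by_cases h1 : PySem.Str.isIn ":" (PySem.Str.strip l) = true
    · rw [if_pos h1]
      by_cases h2 : headerKeysA.contains
          (PySem.Str.upper (PySem.Str.strip ((splitColon1A (PySem.Str.strip l)).getD 0 ""))) = true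
      · rw [if_pos h2]
        have hhd : isHdr l = true := by rw [hiff, h1, h2]; rfl
        have hcast : ((i : Int) + 1) = ((i + 1 : Nat) : Int) := by push_cast; ring
        rw [hcast, ih (i + 1)]
        rw [List.takeWhile_cons, hhd]
        simp only [if_true, List.foldl_cons, List.length_cons]
        have h3 : i + 1 + (List.takeWhile isHdr rest).length
            = i + ((List.takeWhile isHdr rest).length + 1) := by omega
        rw [h3]
      · rw [if_neg h2]
        have hhd : isHdr l = false := by
          rw [hiff, h1]; simp at h2 ⊢; simpa using h2
        rw [List.takeWhile_cons, hhd]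
        simp
    · rw [if_neg h1]
      have hhd : isHdr l = false := by
        rw [hiff]; simp at h1; simp [h1]
      rw [List.takeWhile_cons, hhd]
      simp

-- ---- B side: the recursive parse computes the same foldl ----
lemma bParse_spec (lines : List String) :
    bParse lines =
      (PySem.Str.strip (PySem.Str.join "\n" (lines.drop (lines.takeWhile isHdr).length)),
       (lines.takeWhile isHdr).foldl
        (fun d line =>
          d.insert (PySem.Str.upper (PySem.Str.strip ((splitColon1A (PySem.Str.strip line)).getD 0 "")))
                   (PySem.Str.strip ((splitColon1A (PySem.Str.strip line)).getD 1 ""))) PySem.Dict.empty) := by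
  induction lines with
  | nil => simp [bParse]
  | cons l rest ih =>
    by_cases h1 : PySem.Str.isIn ":" (PySem.Str.strip l) = true
    · by_cases h2 : headerKeysA.contains
          (PySem.Str.upper (PySem.Str.strip ((splitColon1A (PySem.Str.strip l)).getD 0 ""))) = true
      · have hhd : isHdr l = true := by unfold isHdr; rw [h1, h2]; rfl
        have h2' : headerKeysB.contains
            (PySem.Str.upper (PySem.Str.strip ((splitColon1B (PySem.Str.strip l)).getD 0 ""))) = true := h2
        simp only [bParse, h1, if_true, h2', ih, List.takeWhile_cons, hhd, List.length_cons,
          List.drop_succ_cons, List.foldl_cons]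
        refine Prod.ext rfl ?_
        have h := update_foldl_items
          ((rest.takeWhile isHdr).map (fun line =>
            (PySem.Str.upper (PySem.Str.strip ((splitColon1A (PySem.Str.strip line)).getD 0 "")),
             PySem.Str.strip ((splitColon1A (PySem.Str.strip line)).getD 1 ""))))
          (PySem.Dict.empty.insert
            (PySem.Str.upper (PySem.Str.strip ((splitColon1A (PySem.Str.strip l)).getD 0 "")))
            (PySem.Str.strip ((splitColon1A (PySem.Str.strip l)).getD 1 "")))
        simp only [List.foldl_map] at h
        exact h
      · have h2f : headerKeysA.contains
            (PySem.Str.upper (PySem.Str.strip ((splitColon1A (PySem.Str.strip l)).getD 0 ""))) = false := by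
          simpa using h2
        have hhd : isHdr l = false := by unfold isHdr; rw [h2f, Bool.and_false]
        have h2' : headerKeysB.contains
            (PySem.Str.upper (PySem.Str.strip ((splitColon1B (PySem.Str.strip l)).getD 0 ""))) = false := h2f
        simp only [bParse, h1, if_true, h2', Bool.false_eq_true, if_false]
        rw [List.takeWhile_cons, hhd]
        simp
    · have h1' : PySem.Str.isIn ":" (PySem.Str.strip l) = false := by simpa using h1
      have hhd : isHdr l = false := by unfold isHdr; rw [h1', Bool.false_and]
      simp only [bParse, h1', Bool.false_eq_true, if_false]
      rw [List.takeWhile_cons, hhd]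
      simp

-- ===== VERDICT (by name: the statement is the Claim_ definition above) =====
theorem get_txt_headers_spec : Claim_equal_get_txt_headers := by
  intro text _
  show get_txt_headers text = get_txt_headers_alt text
  simp only [get_txt_headers, get_txt_headers_alt]
  have ha := aLoop_spec (PySem.Str.splitlines text) 0 PySem.Dict.empty
  simp only [Nat.cast_zero] at ha
  rw [ha, bParse_spec]
  simp only [Nat.zero_add, PySem.List.slice_from_natCast]
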